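-- pv_equiv track=rewrite | github.com/christinajamerlan/twitter-analysis | docu_input.py | consolidate_entries
-- ===== SOURCE A (Python) =====
-- def consolidate_entries(entries):
--     new_entries = []
--
--     graph_name = entries[0][1]
--     text_entry = []
--
--     # for each entries
--     for para in entries:
--         if graph_name == para[1]: # if same graph, append text
--             text_entry.append(para[0])
--         else: # if different graph
--             # create new entry for the current graph
--             new_entries.append([" ".join(text_entry), graph_name])
--
--             # initialize next graph
--             graph_name = para[1]
--             text_entry = [para[0]]
--
--     # create entry for the last graph
--     new_entries.append([" ".join(text_entry), graph_name])
--
--     return new_entries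
-- ===== SOURCE B (Python) =====
-- def consolidate_entries(entries):
--     # Two-pointer run scan: find each maximal run of equal graph names, join its texts.
--     out = []
--     i, n = 0, len(entries)
--     while i < n:
--         key = entries[i][1]
--         j = i
--         while j < n and entries[j][1] == key:
--             j += 1
--         out.append([" ".join(p[0] for p in entries[i:j]), key])
--         i = j
--     return out
-- ===== Notes on version B (the rewrite author's own statement) =====
-- stated objective: alternative
-- what changed: Replaced A's carried graph_name/text_entry state machine with a two-pointer scan that finds each maximal run of equal graph names and joins its texts directly, removing the same/different branching and the trailing flush.
import Mathlib
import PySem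

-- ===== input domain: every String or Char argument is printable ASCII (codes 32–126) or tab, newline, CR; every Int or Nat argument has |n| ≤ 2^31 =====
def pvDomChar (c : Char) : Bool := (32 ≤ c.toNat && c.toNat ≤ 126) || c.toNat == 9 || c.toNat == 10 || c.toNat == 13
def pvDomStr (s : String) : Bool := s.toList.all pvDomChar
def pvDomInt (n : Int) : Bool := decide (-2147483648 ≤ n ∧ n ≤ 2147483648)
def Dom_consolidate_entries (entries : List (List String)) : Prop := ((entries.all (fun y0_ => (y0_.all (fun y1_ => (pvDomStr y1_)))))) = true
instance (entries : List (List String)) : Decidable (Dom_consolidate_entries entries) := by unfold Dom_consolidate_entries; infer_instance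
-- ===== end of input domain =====

-- B replaces A's carried graph_name/text_entry state machine by a run-scan that emits each
-- maximal run of equal graph names directly (objective: alternative decomposition, same cost).


-- ===== PORT A =====
-- A's loop: carried state (graph_name, text_entry, new_entries); flush on a key change and at the end.
-- para[0]/para[1] are read as getD (Pre_ guarantees length ≥ 2, where Python would otherwise raise).
def ceA_loop (paras : List (List String)) (graph_name : String) (text_entry : List String)
    (new_entries : List (List String)) : List (List String) :=
  match paras with
  | [] => new_entries ++ [[PySem.Str.join " " text_entry, graph_name]]
  | para :: rest =>
    if graph_name == para.getD 1 "" then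
      ceA_loop rest graph_name (text_entry ++ [para.getD 0 ""]) new_entries
    else
      ceA_loop rest (para.getD 1 "") [para.getD 0 ""]
        (new_entries ++ [[PySem.Str.join " " text_entry, graph_name]])

def consolidate_entries (entries : List (List String)) : List (List String) :=
  match entries with
  | [] => []  -- Python raises IndexError on entries[0][1]; excluded by Pre_
  | first :: _ => ceA_loop entries (first.getD 1 "") [] []

-- ===== PORT B =====
-- Source B's outer while: each step takes the maximal run entries[i:j] with the same key
-- (the inner 'while j < n and entries[j][1] == key' = takeWhile/dropWhile) and emits one row.
def ceB_run (entries : List (List String)) : List (List String) :=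
  match entries with
  | [] => []
  | para :: rest =>
    let key := para.getD 1 ""
    let run := rest.takeWhile (fun p => p.getD 1 "" == key)
    [PySem.Str.join " " ((para :: run).map (fun p => p.getD 0 "")), key]
      :: ceB_run (rest.dropWhile (fun p => p.getD 1 "" == key))
termination_by entries.length
decreasing_by
  simp only [List.length_cons]
  exact Nat.lt_succ_of_le (List.length_dropWhile_le _ _)

def consolidate_entries_alt (entries : List (List String)) : List (List String) :=
  ceB_run entries

-- ===== PRECONDITION & SPEC =====
-- Pre_ excludes exactly the inputs where Python A raises IndexError: the empty list
-- (entries[0][1] is read first) and entries containing a row of length < 2 (para[1]/para[0]).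
def Pre_consolidate_entries (entries : List (List String)) : Prop :=
  entries ≠ [] ∧ ∀ p ∈ entries, 2 ≤ p.length
instance (entries : List (List String)) : Decidable (Pre_consolidate_entries entries) := by
  unfold Pre_consolidate_entries; infer_instance

def pvWitness_consolidate_entries : List (List String) :=
  [["hello", "g1"], ["world", "g1"], ["bye", "g2"]]

def Spec_consolidate_entries (entries : List (List String)) (out : List (List String)) : Prop :=
  out = consolidate_entries_alt entries
instance (entries : List (List String)) (out : List (List String)) : Decidable (Spec_consolidate_entries entries out) := by
  unfold Spec_consolidate_entries; infer_instance

-- ===== CLAIM (what is proved, stated in full; the proofs are below) =====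
def Claim_equal_consolidate_entries : Prop := ∀ (entries : List (List String)), Dom_consolidate_entries entries → Pre_consolidate_entries entries → Spec_consolidate_entries entries (consolidate_entries entries)


-- ===== LEMMAS AND PROOFS =====

-- A's accumulating loop, started with pending group (g, t), equals: flush the run of paras
-- matching g appended to t, then B's run-scan on the remainder.
lemma ceA_loop_eq (paras : List (List String)) : ∀ (g : String) (t : List String)
    (acc : List (List String)),
    ceA_loop paras g t acc =
      acc ++ ([PySem.Str.join " " (t ++ (paras.takeWhile (fun p => p.getD 1 "" == g)).map (fun p => p.getD 0 "")), g]
        :: ceB_run (paras.dropWhile (fun p => p.getD 1 "" == g))) := by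
  induction paras with
  | nil => intro g t acc; simp [ceA_loop, ceB_run]
  | cons para rest ih =>
    intro g t acc
    by_cases h : g = para.getD 1 ""
    · have hp : (para.getD 1 "" == g) = true := by simp [h]
      simp only [ceA_loop, h, beq_self_eq_true, if_true, List.takeWhile_cons, hp,
        List.dropWhile_cons, List.map_cons, ih]
      simp
    · have hp : (para.getD 1 "" == g) = false := by
        rw [beq_eq_false_iff_ne]; exact fun hh => h hh.symm
      have hg : (g == para.getD 1 "") = false := by rw [beq_eq_false_iff_ne]; exact h
      simp only [ceA_loop, hg, Bool.false_eq_true, if_false, List.takeWhile_cons, hp,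
        List.dropWhile_cons, ih]
      simp [ceB_run, List.append_assoc]

-- ===== VERDICT (by name: the statement is the Claim_ definition above) =====
theorem consolidate_entries_spec : Claim_equal_consolidate_entries := by
  intro entries _ hpre
  unfold Spec_consolidate_entries
  match entries with
  | [] => exact absurd rfl hpre.1
  | first :: rest =>
    simp only [consolidate_entries, consolidate_entries_alt,
      ceA_loop_eq (first :: rest) (first.getD 1 "") [] []]
    have hp : (first.getD 1 "" == first.getD 1 "") = true := by simp
    conv_rhs => rw [ceB_run]
    simp [List.takeWhile_cons, List.dropWhile_cons, hp]
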